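-- pv_equiv track=rewrite | github.com/Zhang-hn1125/Nuc-back | compare_star.py | judge_mline1
-- ===== SOURCE A (Python) =====
-- def judge_mline1(inline, start):
--     intarget = False
--     for i, line in enumerate(inline[start:start + 70], start=start):
--         if not line.strip():
--             continue
--         if line.strip().startswith("_"):
--             intarget = True
--         elif intarget:
--             return i
--     return -1
-- ===== SOURCE B (Python) =====
-- def judge_mline1(inline, start):
--     window = inline[start:start + 70]
--     # phase 1: index (within window) of the first non-blank line starting with "_"
--     j = None
--     for k, line in enumerate(window):
--         s = line.strip()
--         if s and s.startswith("_"):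
--             j = k
--             break
--     if j is None:
--         return -1
--     # phase 2: first non-blank line after j that does not start with "_"
--     for k in range(j + 1, len(window)):
--         s = window[k].strip()
--         if s and not s.startswith("_"):
--             return start + k
--     return -1
-- ===== Notes on version B (the rewrite author's own statement) =====
-- stated objective: alternative
-- what changed: Replaces the single flag-carrying scan with two sequential phases over the same window: first locate the first underscore-prefixed line, then scan onward for the first non-blank non-underscore line, eliminating the intarget boolean state.
import Mathlib
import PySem

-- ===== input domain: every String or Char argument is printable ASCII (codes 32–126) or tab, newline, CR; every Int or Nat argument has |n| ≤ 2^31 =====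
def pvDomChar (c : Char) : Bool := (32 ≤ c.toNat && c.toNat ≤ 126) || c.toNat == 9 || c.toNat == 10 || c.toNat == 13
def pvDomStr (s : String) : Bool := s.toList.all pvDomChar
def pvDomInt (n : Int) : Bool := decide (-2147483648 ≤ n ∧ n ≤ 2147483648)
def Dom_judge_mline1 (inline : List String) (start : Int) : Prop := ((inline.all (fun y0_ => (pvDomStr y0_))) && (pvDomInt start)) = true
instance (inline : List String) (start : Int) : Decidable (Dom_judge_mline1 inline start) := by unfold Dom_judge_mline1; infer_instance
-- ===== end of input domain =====

-- B is an alternative decomposition of A (two sequential phases instead of a flag-carrying scan); same cost, no speed claim.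

-- ===== PORT A =====
-- one scan over the enumerated window carrying the intarget flag, exactly as A's for-loop
def judgeGoA : List String → Int → Bool → Int
  | [], _, _ => -1
  | line :: rest, i, intarget =>
    let s := PySem.Str.strip line
    if s = "" then judgeGoA rest (i + 1) intarget
    else if PySem.Str.startswith s "_" then judgeGoA rest (i + 1) true
    else if intarget then i
    else judgeGoA rest (i + 1) intarget

def judge_mline1 (inline : List String) (start : Int) : Int :=
  judgeGoA (PySem.List.slice inline (some start) (some (start + 70))) start false

-- ===== PORT B =====
-- phase 1: index within the window of the first non-blank line starting with "_"
def altFindUnd : List String → Option Nat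
  | [] => none
  | line :: rest =>
    let s := PySem.Str.strip line
    if s ≠ "" ∧ PySem.Str.startswith s "_" = true then some 0
    else (altFindUnd rest).map (· + 1)

-- phase 2: first non-blank non-"_" line from absolute index idx onwards
def altFindNon : List String → Int → Int
  | [], _ => -1
  | line :: rest, idx =>
    let s := PySem.Str.strip line
    if s ≠ "" ∧ PySem.Str.startswith s "_" = false then idx
    else altFindNon rest (idx + 1)

def judge_mline1_alt (inline : List String) (start : Int) : Int :=
  let window := PySem.List.slice inline (some start) (some (start + 70))
  match altFindUnd window with
  | none => -1
  | some j => altFindNon (window.drop (j + 1)) (start + (j : Int) + 1)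

-- ===== PRECONDITION & SPEC =====
def Spec_judge_mline1 (inline : List String) (start : Int) (out : Int) : Prop := out = judge_mline1_alt inline start
instance (inline : List String) (start : Int) (out : Int) : Decidable (Spec_judge_mline1 inline start out) := by unfold Spec_judge_mline1; infer_instance

-- ===== CLAIM (what is proved, stated in full; the proofs are below) =====
def Claim_equal_judge_mline1 : Prop := ∀ (inline : List String) (start : Int), Dom_judge_mline1 inline start → Spec_judge_mline1 inline start (judge_mline1 inline start)

-- ===== LEMMAS AND PROOFS =====

-- once the flag is set, A's scan is exactly B's phase-2 scan
theorem judgeGoA_true (l : List String) : ∀ i : Int, judgeGoA l i true = altFindNon l i := by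
  induction l with
  | nil => intro i; rfl
  | cons line rest ih =>
    intro i
    by_cases h0 : PySem.Str.strip line = ""
    · simp only [judgeGoA, altFindNon, h0]
      simp [ih]
    · cases h1 : PySem.Str.startswith (PySem.Str.strip line) "_" with
      | true =>
        simp only [judgeGoA, altFindNon, h0, h1]
        simp [ih]
      | false =>
        simp only [judgeGoA, altFindNon, h0, h1]
        simp [h0]

-- with the flag unset, A's scan is phase 1 followed by phase 2
theorem judgeGoA_false (l : List String) : ∀ i : Int,
    judgeGoA l i false =
      (match altFindUnd l with
       | none => -1
       | some j => altFindNon (l.drop (j + 1)) (i + (j : Int) + 1)) := by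
  induction l with
  | nil => intro i; rfl
  | cons line rest ih =>
    intro i
    by_cases h0 : PySem.Str.strip line = ""
    · simp only [judgeGoA, altFindUnd, h0, ih]
      cases hfu : altFindUnd rest with
      | none => simp
      | some j =>
        simp only [Option.map_some, List.drop_succ_cons]
        have hc : i + 1 + (j : Int) + 1 = i + ((j : Nat) + 1 : Nat) + 1 := by push_cast; ring
        simp [hc]
    · cases h1 : PySem.Str.startswith (PySem.Str.strip line) "_" with
      | true =>
        simp only [judgeGoA, altFindUnd, h0, h1]
        simp [h0, judgeGoA_true]
      | false =>
        simp only [judgeGoA, altFindUnd, h0, h1, ih]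
        cases hfu : altFindUnd rest with
        | none => simp
        | some j =>
          simp only [Option.map_some, List.drop_succ_cons]
          have hc : i + 1 + (j : Int) + 1 = i + ((j : Nat) + 1 : Nat) + 1 := by push_cast; ring
          simp [hc]

-- ===== VERDICT (by name: the statement is the Claim_ definition above) =====
theorem judge_mline1_spec : Claim_equal_judge_mline1 := by
  intro inline start _
  unfold Spec_judge_mline1 judge_mline1 judge_mline1_alt
  exact judgeGoA_false _ start
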